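-- pv_equiv track=rewrite | github.com/maltesIam/cyberdemo | backend/src/generators/gen_edr.py | get_detections_by_severity
-- ===== SOURCE A (Python) =====
-- from typing import Dict, List, Optional
--
-- def get_detections_by_severity(detections: List[Dict]) -> Dict[str, List[Dict]]:
--     """
--     Group detections by severity level.
--
--     Args:
--         detections: List of detection dictionaries
--
--     Returns:
--         Dictionary mapping severity levels to lists of detections
--     """
--     by_severity: Dict[str, List[Dict]] = {
--         "Critical": [],
--         "High": [],
--         "Medium": [],
--         "Low": [],
--     }
--
--     for detection in detections:
--         severity = detection.get("severity", "Medium")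
--         if severity in by_severity:
--             by_severity[severity].append(detection)
--
--     return by_severity
-- ===== SOURCE B (Python) =====
-- def get_detections_by_severity(detections):
--     return {
--         sev: [d for d in detections if d.get("severity", "Medium") == sev]
--         for sev in ("Critical", "High", "Medium", "Low")
--     }
-- ===== Notes on version B (the rewrite author's own statement) =====
-- stated objective: idiomatic
-- what changed: B replaces A's single-pass loop that mutates a prebuilt dict of buckets with a dict comprehension that filters the detections list once per severity key (four passes), which also makes the dropping of unknown severities implicit.
import Mathlib
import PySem

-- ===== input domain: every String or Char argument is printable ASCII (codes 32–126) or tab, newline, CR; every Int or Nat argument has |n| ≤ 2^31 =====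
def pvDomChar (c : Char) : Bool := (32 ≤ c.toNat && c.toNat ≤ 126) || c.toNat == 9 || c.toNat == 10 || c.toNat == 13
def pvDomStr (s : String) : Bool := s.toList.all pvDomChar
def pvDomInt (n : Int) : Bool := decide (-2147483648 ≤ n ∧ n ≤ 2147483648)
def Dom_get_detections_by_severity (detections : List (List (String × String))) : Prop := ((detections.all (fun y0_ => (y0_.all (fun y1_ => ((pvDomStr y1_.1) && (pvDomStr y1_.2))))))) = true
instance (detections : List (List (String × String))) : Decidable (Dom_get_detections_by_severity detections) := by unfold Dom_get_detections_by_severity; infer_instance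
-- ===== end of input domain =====

-- B groups with one filter pass per fixed severity key instead of A's single
-- dict-mutation loop; objective: idiomatic, not faster.

-- ===== PORT A =====
def get_detections_by_severity (detections : List (List (String × String))) : List (String × List (List (String × String))) :=
  let init : PySem.Dict String (List (List (String × String))) :=
    PySem.Dict.ofList [("Critical", []), ("High", []), ("Medium", []), ("Low", [])]
  let by_severity := detections.foldl (fun d detection =>
    let severity := (PySem.Dict.mk detection).getD "severity" "Medium"
    if d.contains severity then d.modify severity [] (fun l => l ++ [detection]) else d) init
  by_severity.items

-- ===== PORT B =====
def get_detections_by_severity_alt (detections : List (List (String × String))) : List (String × List (List (String × String))) :=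
  ["Critical", "High", "Medium", "Low"].map (fun sev =>
    (sev, detections.filter (fun d => (PySem.Dict.mk d).getD "severity" "Medium" == sev)))

-- ===== PRECONDITION & SPEC =====
def Spec_get_detections_by_severity (detections : List (List (String × String))) (out : List (String × List (List (String × String)))) : Prop := out = get_detections_by_severity_alt detections
instance (detections : List (List (String × String))) (out : List (String × List (List (String × String)))) : Decidable (Spec_get_detections_by_severity detections out) := by unfold Spec_get_detections_by_severity; infer_instance

-- ===== CLAIM (what is proved, stated in full; the proofs are below) =====
def Claim_equal_get_detections_by_severity : Prop := ∀ (detections : List (List (String × String))), Dom_get_detections_by_severity detections → Spec_get_detections_by_severity detections (get_detections_by_severity detections)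

-- ===== LEMMAS AND PROOFS =====

-- One step of A's loop, named so the lemmas can talk about it.
def pvStep (d : PySem.Dict String (List (List (String × String)))) (detection : List (String × String)) : PySem.Dict String (List (List (String × String))) :=
  if d.contains ((PySem.Dict.mk detection).getD "severity" "Medium")
  then d.modify ((PySem.Dict.mk detection).getD "severity" "Medium") [] (fun l => l ++ [detection]) else d

lemma pvStep_keys (d : PySem.Dict String (List (List (String × String)))) (det : List (String × String)) :
    (pvStep d det).keys = d.keys := by
  unfold pvStep
  split
  · next h => rw [PySem.Dict.keys_modify, PySem.Dict.keys_insert_of_contains _ _ h]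
  · rfl

lemma pvStep_contains (d : PySem.Dict String (List (List (String × String)))) (det : List (String × String)) (k : String) :
    (pvStep d det).contains k = d.contains k := by
  unfold pvStep
  split
  · next h =>
      rw [PySem.Dict.contains_modify]
      rcases eq_or_ne k ((PySem.Dict.mk det).getD "severity" "Medium") with heq | hne
      · rw [heq, h]; simp
      · simp [hne]
  · rfl

lemma pvFold_keys (l : List (List (String × String))) (d : PySem.Dict String (List (List (String × String)))) :
    (l.foldl pvStep d).keys = d.keys := by
  induction l generalizing d with
  | nil => rfl
  | cons det l ih => simpa [List.foldl, pvStep_keys] using ih (pvStep d det)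

lemma pvFold_getD (l : List (List (String × String))) (d : PySem.Dict String (List (List (String × String)))) (k : String)
    (hk : d.contains k = true) :
    (l.foldl pvStep d).getD k []
      = d.getD k [] ++ l.filter (fun det => (PySem.Dict.mk det).getD "severity" "Medium" == k) := by
  induction l generalizing d with
  | nil => simp
  | cons det l ih =>
    have hk' : (pvStep d det).contains k = true := by rw [pvStep_contains]; exact hk
    rw [List.foldl_cons, ih (pvStep d det) hk', List.filter_cons]
    by_cases hs : (PySem.Dict.mk det).getD "severity" "Medium" = k
    · have hstep : pvStep d det = d.modify k [] (fun l => l ++ [det]) := by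
        unfold pvStep; rw [hs, hk]; simp
      rw [hstep, PySem.Dict.getD_modify_self]
      simp [hs]
    · have hgd : (pvStep d det).getD k [] = d.getD k [] := by
        unfold pvStep
        split
        · exact PySem.Dict.getD_modify_of_ne _ _ _ (fun h => hs h.symm)
        · rfl
      rw [hgd]
      simp [hs]

-- ===== VERDICT (by name: the statement is the Claim_ definition above) =====
theorem get_detections_by_severity_spec : Claim_equal_get_detections_by_severity := by
  intro detections _
  show get_detections_by_severity detections = get_detections_by_severity_alt detections
  show (detections.foldl pvStep (PySem.Dict.ofList [("Critical", []), ("High", []), ("Medium", []), ("Low", [])])).items = _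
  set init : PySem.Dict String (List (List (String × String))) :=
    PySem.Dict.ofList [("Critical", []), ("High", []), ("Medium", []), ("Low", [])] with hinit
  have hkeys : (detections.foldl pvStep init).keys = ["Critical", "High", "Medium", "Low"] := by
    rw [pvFold_keys]; decide
  have hnd : (detections.foldl pvStep init).keys.Nodup := by rw [hkeys]; decide
  rw [PySem.Dict.items_eq_map_keys _ hnd ([] : List (List (String × String))), hkeys]
  simp only [List.map_cons, List.map_nil]
  rw [pvFold_getD _ _ _ (by decide), pvFold_getD _ _ _ (by decide),
      pvFold_getD _ _ _ (by decide), pvFold_getD _ _ _ (by decide)]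
  simp [hinit, get_detections_by_severity_alt]
  refine ⟨by decide, by decide, by decide, by decide⟩
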